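-- pv_equiv track=rewrite | github.com/pyMurphy/python | Math/equations.py | check_coefficient
-- ===== SOURCE A (Python) =====
-- coefficient_list = [0,1,2,3,4,5,6,7,8,9]	# List of digits 0-9
--
-- space_list = [' ','+','-','/','*','=']		# List of possible characters used between variables
--
-- def check_coefficient(equation, xpos):					# Returns the coefficient of the variable
-- 	result=[]
-- 	chars_before = len(equation[:xpos])					# Gets the number of characters before the position of the variable in the string
-- 	spaced = False
-- 	while not spaced and xpos > 0:						# Loops until every character before is checked or there are no more digits in the coefficient
-- 		for coefficient in coefficient_list:
-- 			if str(coefficient) in equation[xpos-1]:	# Checks if the digit 0-9 is equal to the character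
-- 				result.append(coefficient)				# adds digit to the results array
-- 			else:
-- 				for space in space_list:				# Checks for characters that aren't digits to break out the loop
-- 					if space in equation[xpos-1]:
-- 						spaced = True					# breaks the loop as all the digits are now in the results table
-- 		xpos -= 1										# Takes 1 from xpos so that it goes back another character
-- 	try:
-- 		coefficient_list_str = map(str,(list(reversed(result))))	# Reverses the results array and turns it into an array of strings
-- 		coefficient_str = ''.join(coefficient_list_str)				# Joins items in the results array into a single string
-- 		return int(coefficient_str)									# Turns string into integer and returns the coefficient of the variable
-- 	except:
-- 		return 1													# if there are no coefficients, we assume it is being multiplied by 1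
-- ===== SOURCE B (Python) =====
-- def check_coefficient(equation, xpos):
--     # Forward single pass over the characters before xpos: collect digit
--     # characters, reset the collection at a separator, ignore anything else.
--     acc = []
--     for i in range(xpos):
--         c = equation[i]
--         if c in '0123456789':
--             acc.append(c)
--         elif c in ' +-/*=':
--             acc = []
--     try:
--         return int(''.join(acc))
--     except ValueError:
--         return 1
-- ===== Notes on version B (the rewrite author's own statement) =====
-- stated objective: simpler
-- what changed: Replaces A's backward while-loop, which scans the 10-digit and 6-separator candidate lists with substring tests for every character and finishes with reverse/map/join/int, by a single forward pass over the prefix that classifies each character directly (digit: append, separator: reset accumulator).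
import Mathlib
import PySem

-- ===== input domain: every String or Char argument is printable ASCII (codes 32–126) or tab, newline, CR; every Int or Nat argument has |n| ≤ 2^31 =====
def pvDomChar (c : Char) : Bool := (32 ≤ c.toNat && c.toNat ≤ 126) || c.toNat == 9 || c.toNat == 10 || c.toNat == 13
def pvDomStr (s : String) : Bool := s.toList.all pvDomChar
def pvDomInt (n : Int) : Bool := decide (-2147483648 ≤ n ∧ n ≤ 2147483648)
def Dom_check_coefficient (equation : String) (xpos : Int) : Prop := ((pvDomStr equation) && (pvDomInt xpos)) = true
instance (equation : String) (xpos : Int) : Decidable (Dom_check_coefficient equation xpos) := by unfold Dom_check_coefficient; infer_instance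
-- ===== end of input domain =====

-- B replaces A's backward while-loop (with its 10x6 per-character candidate scans and the
-- reverse/map/join finish) by a single forward pass classifying each character directly; same values, no speed claim.


-- ===== PORT A =====
def coefficient_list : List Int := [0, 1, 2, 3, 4, 5, 6, 7, 8, 9]

-- Python's 1-char strings are ported as Char lists
def space_list : List (List Char) := [[' '], ['+'], ['-'], ['/'], ['*'], ['=']]

-- the body of the `for coefficient in coefficient_list` loop; `str(coefficient) in equation[xpos-1]`
-- and `space in equation[xpos-1]` are containment of a 1-char string in a 1-char string,
-- which is exactly equality of the character lists (exact).
def ccA_inner (ch : Char) (st : List Int × Bool) : List Int × Bool :=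
  coefficient_list.foldl (fun st coefficient =>
    if PySem.Int.toChars coefficient = [ch] then
      (st.1 ++ [coefficient], st.2)
    else
      (st.1, space_list.foldl (fun spaced space => if space = [ch] then true else spaced) st.2)) st

-- the `while not spaced and xpos > 0` loop, counting xpos down; the counter is xpos.toNat
-- (the loop only runs while xpos > 0), so equation[xpos-1] is equation[(n : Int)] at counter n+1
def ccA_loop (equation : String) : Nat → List Int → Bool → List Int
  | 0, result, _ => result
  | n + 1, result, spaced =>
    if spaced then result
    else
      match PySem.Str.pyGet? equation (n : Int) with
      | none => result   -- Python raises IndexError here (xpos - 1 ≥ len); excluded by Pre_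
      | some ch =>
        let st := ccA_inner ch (result, spaced)
        ccA_loop equation n st.1 st.2

def check_coefficient (equation : String) (xpos : Int) : Int :=
  let result := ccA_loop equation xpos.toNat [] false
  -- ''.join(map(str, list(reversed(result)))) then int(...) with `except: return 1`
  match PySem.Int.ofChars? (PySem.Chars.join [] ((result.reverse).map PySem.Int.toChars)) with
  | some v => v
  | none => 1

-- ===== PORT B =====
def check_coefficient_alt (equation : String) (xpos : Int) : Int :=
  let acc := (PySem.List.pyRange 0 xpos 1).foldl (fun acc i =>
    match PySem.Str.pyGet? equation i with
    | none => acc   -- Python raises IndexError here; excluded by Pre_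
    | some c =>
      if "0123456789".toList.contains c then acc ++ [c]
      else if " +-/*=".toList.contains c then [] else acc) []
  match PySem.Int.ofChars? acc with
  | some v => v
  | none => 1

-- ===== PRECONDITION & SPEC =====
-- A (and B) raise IndexError when xpos > len(equation); exactly those inputs are excluded.
def Pre_check_coefficient (equation : String) (xpos : Int) : Prop :=
  xpos ≤ PySem.Str.len equation
instance (equation : String) (xpos : Int) : Decidable (Pre_check_coefficient equation xpos) := by
  unfold Pre_check_coefficient; infer_instance

def pvWitness_check_coefficient : String × Int := ("23x=4", 2)

def Spec_check_coefficient (equation : String) (xpos : Int) (out : Int) : Prop := out = check_coefficient_alt equation xpos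
instance (equation : String) (xpos : Int) (out : Int) : Decidable (Spec_check_coefficient equation xpos out) := by unfold Spec_check_coefficient; infer_instance

-- ===== CLAIM (what is proved, stated in full; the proofs are below) =====
def Claim_equal_check_coefficient : Prop := ∀ (equation : String) (xpos : Int), Dom_check_coefficient equation xpos → Pre_check_coefficient equation xpos → Spec_check_coefficient equation xpos (check_coefficient equation xpos)

-- ===== LEMMAS AND PROOFS =====

-- B's per-character step
def pvStep (acc : List Char) (c : Char) : List Char :=
  if "0123456789".toList.contains c then acc ++ [c]
  else if " +-/*=".toList.contains c then [] else acc

-- digits collected scanning BACKWARD (input is the reversed prefix): keep digits, stop at a separator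
def pvBwd : List Char → List Char
  | [] => []
  | c :: cs =>
    if "0123456789".toList.contains c then c :: pvBwd cs
    else if " +-/*=".toList.contains c then [] else pvBwd cs

def pvVal (c : Char) : Int := (c.toNat : Int) - 48

lemma ccA_inner_digit (ch : Char) (h : "0123456789".toList.contains ch = true) (r : List Int) :
    ccA_inner ch (r, false) = (r ++ [pvVal ch], false) := by
  simp [List.contains_eq_mem] at h
  rcases h with h | h | h | h | h | h | h | h | h | h <;> subst h <;> rfl

lemma ccA_inner_sep (ch : Char) (h : " +-/*=".toList.contains ch = true) (r : List Int) :
    ccA_inner ch (r, false) = (r, true) := by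
  simp [List.contains_eq_mem] at h
  rcases h with h | h | h | h | h | h <;> subst h <;> rfl

lemma ccA_inner_other (ch : Char) (hd : "0123456789".toList.contains ch = false)
    (hs : " +-/*=".toList.contains ch = false) (r : List Int) :
    ccA_inner ch (r, false) = (r, false) := by
  simp [List.contains_eq_mem] at hd hs
  obtain ⟨d0, d1, d2, d3, d4, d5, d6, d7, d8, d9⟩ := hd
  obtain ⟨s0, s1, s2, s3, s4, s5⟩ := hs
  simp [ccA_inner, coefficient_list, space_list, List.foldl,
    show PySem.Int.toChars 0 = ['0'] from rfl, show PySem.Int.toChars 1 = ['1'] from rfl,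
    show PySem.Int.toChars 2 = ['2'] from rfl, show PySem.Int.toChars 3 = ['3'] from rfl,
    show PySem.Int.toChars 4 = ['4'] from rfl, show PySem.Int.toChars 5 = ['5'] from rfl,
    show PySem.Int.toChars 6 = ['6'] from rfl, show PySem.Int.toChars 7 = ['7'] from rfl,
    show PySem.Int.toChars 8 = ['8'] from rfl, show PySem.Int.toChars 9 = ['9'] from rfl,
    Ne.symm d0, Ne.symm d1, Ne.symm d2, Ne.symm d3, Ne.symm d4, Ne.symm d5, Ne.symm d6,
    Ne.symm d7, Ne.symm d8, Ne.symm d9, Ne.symm s0, Ne.symm s1, Ne.symm s2, Ne.symm s3,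
    Ne.symm s4, Ne.symm s5]

lemma ccA_loop_spaced (equation : String) (n : Nat) (r : List Int) :
    ccA_loop equation n r true = r := by
  cases n <;> simp [ccA_loop]

lemma ccA_loop_eq (equation : String) :
    ∀ (n : Nat) (r : List Int), n ≤ equation.toList.length →
      ccA_loop equation n r false = r ++ (pvBwd ((equation.toList.take n).reverse)).map pvVal := by
  intro n
  induction n with
  | zero => intro r _; simp [ccA_loop, pvBwd]
  | succ n ih =>
    intro r hn
    have hlt : n < equation.toList.length := by omega
    have hget : PySem.Str.pyGet? equation (n : Int) = some (equation.toList[n]) := by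
      simp [List.getElem?_eq_getElem hlt]
    have htake : equation.toList.take (n + 1) = equation.toList.take n ++ [equation.toList[n]] := by
      rw [List.take_add_one, List.getElem?_eq_getElem hlt]; rfl
    set ch := equation.toList[n] with hch
    rcases hdig : "0123456789".toList.contains ch with hfalse | htrue
    · rcases hsep : " +-/*=".toList.contains ch with hfalse' | htrue'
      · -- neither digit nor separator: skipped
        simp only [ccA_loop, Bool.false_eq_true, if_false, hget]
        rw [ccA_inner_other ch hdig hsep]
        rw [ih r (by omega)]
        rw [htake]
        simp only [List.reverse_append, List.reverse_cons, List.reverse_nil, List.nil_append,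
          List.singleton_append, pvBwd, hdig, hsep]
        simp
      · -- separator: loop stops
        simp only [ccA_loop, Bool.false_eq_true, if_false, hget]
        rw [ccA_inner_sep ch hsep]
        rw [ccA_loop_spaced]
        rw [htake]
        simp only [List.reverse_append, List.reverse_cons, List.reverse_nil, List.nil_append,
          List.singleton_append, pvBwd, hdig, hsep]
        simp
    · -- digit: appended
      simp only [ccA_loop, Bool.false_eq_true, if_false, hget]
      rw [ccA_inner_digit ch hdig]
      rw [ih (r ++ [pvVal ch]) (by omega)]
      rw [htake]
      simp only [List.reverse_append, List.reverse_cons, List.reverse_nil, List.nil_append,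
        List.singleton_append, pvBwd, hdig]
      simp

-- every character pvBwd keeps is a digit character
lemma pvBwd_all_dig : ∀ cs : List Char, ∀ c ∈ pvBwd cs, "0123456789".toList.contains c = true := by
  intro cs
  induction cs with
  | nil => simp [pvBwd]
  | cons a t ih =>
    intro c hc
    rcases hd : "0123456789".toList.contains a with _ | _
    · rcases hs : " +-/*=".toList.contains a with _ | _
      · simp only [pvBwd, hd, hs, Bool.false_eq_true, if_false] at hc
        exact ih c hc
      · simp only [pvBwd, hd, hs, Bool.false_eq_true, if_false] at hc
        simp at hc
    · simp only [pvBwd, hd] at hc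
      rcases List.mem_cons.mp hc with rfl | hc
      · exact hd
      · exact ih c hc

lemma toChars_pvVal (c : Char) (h : "0123456789".toList.contains c = true) :
    PySem.Int.toChars (pvVal c) = [c] := by
  simp [List.contains_eq_mem] at h
  rcases h with h | h | h | h | h | h | h | h | h | h <;> subst h <;> rfl

-- forward scan over a list equals the reversed backward collection
lemma fwd_rev_eq (cs : List Char) : cs.reverse.foldl pvStep [] = (pvBwd cs).reverse := by
  induction cs with
  | nil => rfl
  | cons c t ih =>
    rw [List.reverse_cons, List.foldl_append, ih, List.foldl_cons, List.foldl_nil]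
    rcases hd : "0123456789".toList.contains c with _ | _
    · rcases hs : " +-/*=".toList.contains c with _ | _
      · simp only [pvStep, pvBwd, hd, hs, Bool.false_eq_true, if_false]
      · simp only [pvStep, pvBwd, hd, hs, Bool.false_eq_true, if_false]
        simp
    · simp only [pvStep, pvBwd, hd]
      simp

-- B's fold over range indices equals the fold of pvStep over the character prefix
lemma range_fold (L : List Char) :
    ∀ n : Nat, n ≤ L.length → ∀ init : List Char,
      (List.range n).foldl (fun acc k =>
        match L[k]? with
        | none => acc
        | some c => pvStep acc c) init
      = (L.take n).foldl pvStep init := by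
  intro n
  induction n with
  | zero => intro _ init; simp
  | succ n ih =>
    intro hn init
    have hlt : n < L.length := by omega
    have htake : L.take (n + 1) = L.take n ++ [L[n]] := by
      rw [List.take_add_one, List.getElem?_eq_getElem hlt]; rfl
    rw [List.range_succ, List.foldl_append, ih (by omega), htake, List.foldl_append]
    simp [List.getElem?_eq_getElem hlt]

-- B's fold over pyRange indices equals the fold of pvStep over the character prefix
lemma alt_acc_eq (equation : String) (xpos : Int) (h : xpos.toNat ≤ equation.toList.length) :
    (PySem.List.pyRange 0 xpos 1).foldl (fun acc i =>
      match PySem.Str.pyGet? equation i with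
      | none => acc
      | some c =>
        if "0123456789".toList.contains c then acc ++ [c]
        else if " +-/*=".toList.contains c then [] else acc) []
    = (equation.toList.take xpos.toNat).foldl pvStep [] := by
  change (PySem.List.pyRange 0 xpos 1).foldl (fun acc i =>
      match PySem.Str.pyGet? equation i with
      | none => acc
      | some c => pvStep acc c) [] = _
  rw [PySem.List.pyRange_one, List.foldl_map]
  have hx : (xpos - 0).toNat = xpos.toNat := by omega
  rw [hx]
  rw [← range_fold equation.toList xpos.toNat h []]
  apply PySem.List.foldl_congr_mem
  intro acc k _
  simp only [zero_add, PySem.Str.pyGet?_natCast]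

theorem check_coefficient_spec : Claim_equal_check_coefficient := by
  intro equation xpos _ hpre
  unfold Spec_check_coefficient
  have hlen : xpos ≤ (equation.toList.length : Int) := by
    have := hpre
    unfold Pre_check_coefficient at this
    simpa [PySem.Str.len_eq] using this
  have hn : xpos.toNat ≤ equation.toList.length := by omega
  unfold check_coefficient check_coefficient_alt
  rw [ccA_loop_eq equation xpos.toNat [] hn, alt_acc_eq equation xpos hn]
  have hacc := fwd_rev_eq ((equation.toList.take xpos.toNat).reverse)
  rw [List.reverse_reverse] at hacc
  rw [hacc]
  have hmap : ((List.map pvVal (pvBwd ((equation.toList.take xpos.toNat).reverse))).reverse).map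
        PySem.Int.toChars
      = ((pvBwd ((equation.toList.take xpos.toNat).reverse)).reverse).map (fun c => [c]) := by
    rw [← List.map_reverse, List.map_map]
    apply List.map_congr_left
    intro c hc
    exact toChars_pvVal c (pvBwd_all_dig _ c (List.mem_reverse.mp hc))
  simp only [List.nil_append]
  rw [hmap, PySem.Chars.join_nil_singletons]
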